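-- pv_equiv track=rewrite | github.com/wronnyhuang/bin | parse_wer.py | sort_filelist_by_lang
-- ===== SOURCE A (Python) =====
-- def sort_filelist_by_lang(files):
--   languages = 'en_us, en_in, ar_eg, ar_x_gulf, hi_in, mr_in, bn_bd, es_es, es_us, pt_br, hu_hu, ms_my, ru_ru, tr_tr, cmn_hant_tw'
--   languages = languages.replace('_', '')
--   languages = languages.replace(' ', '')
--   languages = languages.split(',')
--   sortedfiles = []
--   for lang in languages:
--     sortedfiles.append(None)
--     for file in files:
--       if lang in file:
--         sortedfiles.pop()
--         sortedfiles.append(file)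
--         break
--   return sortedfiles
-- ===== SOURCE B (Python) =====
-- def sort_filelist_by_lang(files):
--   languages = 'en_us, en_in, ar_eg, ar_x_gulf, hi_in, mr_in, bn_bd, es_es, es_us, pt_br, hu_hu, ms_my, ru_ru, tr_tr, cmn_hant_tw'
--   languages = languages.replace('_', '')
--   languages = languages.replace(' ', '')
--   languages = languages.split(',')
--   found = [(lang, None) for lang in languages]
--   for file in files:
--     found = [(lang, file if slot is None and lang in file else slot)
--              for (lang, slot) in found]
--   return [slot for (lang, slot) in found]
-- ===== Notes on version B (the rewrite author's own statement) =====
-- stated objective: alternative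
-- what changed: Inverted loop nesting: a single pass over files maintains a first-match dict for all languages at once, instead of re-scanning the file list per language with append/pop/break.
import Mathlib
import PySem

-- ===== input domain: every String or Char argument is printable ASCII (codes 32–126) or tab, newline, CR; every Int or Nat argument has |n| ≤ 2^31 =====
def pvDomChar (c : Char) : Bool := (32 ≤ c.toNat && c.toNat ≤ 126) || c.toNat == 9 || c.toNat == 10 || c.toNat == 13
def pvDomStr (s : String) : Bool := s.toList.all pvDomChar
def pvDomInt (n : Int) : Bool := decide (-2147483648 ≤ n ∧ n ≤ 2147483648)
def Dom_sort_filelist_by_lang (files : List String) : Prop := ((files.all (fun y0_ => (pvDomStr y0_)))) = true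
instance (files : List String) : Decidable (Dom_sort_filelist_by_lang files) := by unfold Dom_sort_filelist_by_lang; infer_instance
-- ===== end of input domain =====

-- B replaces A's per-language re-scan of files (append None / pop / break) by one pass over
-- files that updates a first-match slot for every language at once; objective: alternative.

-- ===== PORT A =====
-- inner 'for file in files: if lang in file: sortedfiles.pop(); sortedfiles.append(file); break'
-- (sortedfiles is nonempty here — a None was just appended — so pop() is dropLast; exact)
def pvALoop (lang : String) (files : List String) (sf : List (Option String)) : List (Option String) :=
  match files with
  | [] => sf
  | f :: rest => if PySem.Str.isIn lang f then sf.dropLast ++ [some f] else pvALoop lang rest sf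

def sort_filelist_by_lang (files : List String) : List (Option String) :=
  let languages := "en_us, en_in, ar_eg, ar_x_gulf, hi_in, mr_in, bn_bd, es_es, es_us, pt_br, hu_hu, ms_my, ru_ru, tr_tr, cmn_hant_tw"
  let languages := PySem.Str.replace languages "_" ""
  let languages := PySem.Str.replace languages " " ""
  -- str.split(',') with the nonempty literal sep ',' always returns (split? = some); getD is exact here
  let languages := (PySem.Str.split? languages ",").getD []
  languages.foldl (fun sf lang => pvALoop lang files (sf ++ [none])) []

-- ===== PORT B =====
def sort_filelist_by_lang_alt (files : List String) : List (Option String) :=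
  let languages := "en_us, en_in, ar_eg, ar_x_gulf, hi_in, mr_in, bn_bd, es_es, es_us, pt_br, hu_hu, ms_my, ru_ru, tr_tr, cmn_hant_tw"
  let languages := PySem.Str.replace languages "_" ""
  let languages := PySem.Str.replace languages " " ""
  -- str.split(',') with the nonempty literal sep ',' always returns (split? = some); getD is exact here
  let languages := (PySem.Str.split? languages ",").getD []
  let found := languages.map (fun lang => (lang, (none : Option String)))
  let found := files.foldl
    (fun fd file => fd.map (fun e =>
      (e.1, if e.2 = none ∧ PySem.Str.isIn e.1 file then some file else e.2))) found
  found.map (fun e => e.2)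

-- ===== PRECONDITION & SPEC =====
def Spec_sort_filelist_by_lang (files : List String) (out : List (Option String)) : Prop := out = sort_filelist_by_lang_alt files
instance (files : List String) (out : List (Option String)) : Decidable (Spec_sort_filelist_by_lang files out) := by unfold Spec_sort_filelist_by_lang; infer_instance

-- ===== CLAIM (what is proved, stated in full; the proofs are below) =====
def Claim_equal_sort_filelist_by_lang : Prop := ∀ (files : List String), Dom_sort_filelist_by_lang files → Spec_sort_filelist_by_lang files (sort_filelist_by_lang files)

-- ===== LEMMAS AND PROOFS =====

-- first file containing lang, the common characterisation of both loops
def pvFirst (lang : String) : List String → Option String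
  | [] => none
  | f :: rest => if PySem.Str.isIn lang f then some f else pvFirst lang rest

theorem pvALoop_eq (lang : String) (files : List String) (sf : List (Option String)) :
    pvALoop lang files (sf ++ [none]) = sf ++ [pvFirst lang files] := by
  induction files with
  | nil => rfl
  | cons f rest ih =>
      simp only [pvALoop, pvFirst]
      split <;> simp [ih]

theorem pvBFold_eq (files : List String) (fd : List (String × Option String)) :
    files.foldl
      (fun fd file => fd.map (fun e =>
        (e.1, if e.2 = none ∧ PySem.Str.isIn e.1 file then some file else e.2))) fd
    = fd.map (fun e => (e.1, match e.2 with
        | some v => some v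
        | none => pvFirst e.1 files)) := by
  induction files generalizing fd with
  | nil =>
      simp only [List.foldl_nil]
      conv_lhs => rw [← List.map_id fd]
      apply List.map_congr_left
      intro e _
      obtain ⟨l, o⟩ := e
      cases o <;> simp [pvFirst]
  | cons f rest ih =>
      simp only [List.foldl_cons, ih, List.map_map]
      apply List.map_congr_left
      intro e _
      cases h : e.2 with
      | some v => simp [h]
      | none =>
          by_cases hin : PySem.Chars.isIn e.1.toList f.toList = true <;>
            simp [h, hin, pvFirst]

-- ===== VERDICT (by name: the statement is the Claim_ definition above) =====
theorem sort_filelist_by_lang_spec : Claim_equal_sort_filelist_by_lang := by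
  intro files _
  show sort_filelist_by_lang files = sort_filelist_by_lang_alt files
  simp only [sort_filelist_by_lang, sort_filelist_by_lang_alt, pvBFold_eq, List.map_map,
    pvALoop_eq]
  rw [PySem.List.foldl_append_singleton_eq_map]
  simp [Function.comp]
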